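-- pv_equiv track=rewrite | github.com/Dog-Dont-Drink/medicode | backend/app/services/advanced_modeling_service.py | _replace_predictors
-- ===== SOURCE A (Python) =====
-- def _clean_str_list(values: list[str]) -> list[str]:
--     seen: set[str] = set()
--     normalized: list[str] = []
--     for value in values:
--         text = str(value).strip()
--         if not text or text in seen:
--             continue
--         seen.add(text)
--         normalized.append(text)
--     return normalized
--
-- def _replace_predictors(
--     predictors: list[str],
--     replacements: dict[str, list[str]],
-- ) -> list[str]:
--     next_predictors: list[str] = []
--     for predictor in predictors:
--         if predictor in replacements:
--             next_predictors.extend(replacements[predictor])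
--         else:
--             next_predictors.append(predictor)
--     return _clean_str_list(next_predictors)
-- ===== SOURCE B (Python) =====
-- def _dedup(texts: list[str]) -> list[str]:
--     # first-occurrence dedup by repeated filtering: emit the head (unless empty),
--     # delete every later copy of it from the worklist, continue; no seen-set needed.
--     result: list[str] = []
--     pending = texts
--     while pending:
--         head = pending[0]
--         pending = [t for t in pending[1:] if t != head]
--         if head:
--             result.append(head)
--     return result
--
--
-- def _replace_predictors(
--     predictors: list[str],
--     replacements: dict[str, list[str]],
-- ) -> list[str]:
--     texts = [
--         str(value).strip()
--         for predictor in predictors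
--         for value in (replacements[predictor] if predictor in replacements else [predictor])
--     ]
--     return _dedup(texts)
-- ===== Notes on version B (the rewrite author's own statement) =====
-- stated objective: alternative
-- what changed: B builds the stripped expansion as one comprehension and deduplicates by recursive filtering (delete all later copies of the head, recurse), with no seen-set and no accumulator; A expands into an intermediate list and then runs a seen-set/accumulator pass.
import Mathlib
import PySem

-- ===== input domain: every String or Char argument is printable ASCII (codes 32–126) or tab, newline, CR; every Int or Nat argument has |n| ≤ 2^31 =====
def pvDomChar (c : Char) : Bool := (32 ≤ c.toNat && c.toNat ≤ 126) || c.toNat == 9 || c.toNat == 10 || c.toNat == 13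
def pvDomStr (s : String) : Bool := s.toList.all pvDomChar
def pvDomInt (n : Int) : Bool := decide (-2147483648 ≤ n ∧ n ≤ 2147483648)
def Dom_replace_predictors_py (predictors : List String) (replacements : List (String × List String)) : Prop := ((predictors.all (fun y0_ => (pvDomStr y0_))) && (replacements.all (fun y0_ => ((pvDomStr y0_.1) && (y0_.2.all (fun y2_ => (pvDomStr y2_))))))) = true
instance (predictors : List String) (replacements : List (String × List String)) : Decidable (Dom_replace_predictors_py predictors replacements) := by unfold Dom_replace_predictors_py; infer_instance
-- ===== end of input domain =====

-- B builds the stripped expansion as one comprehension and deduplicates by recursive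
-- filtering (drop all later copies of the head, recurse) with no seen-set (objective: alternative).


-- ===== PORT A =====
-- first-match lookup on the association list (Python dict membership / indexing)
def pvLookup : List (String × List String) → String → Option (List String)
  | [], _ => none
  | (k, v) :: rest, p => if k = p then some v else pvLookup rest p

-- _clean_str_list: one pass with a seen-set and an accumulator
def pvCleanStep (st : PySem.Set String × List String) (value : String) : PySem.Set String × List String :=
  let text := PySem.Str.strip value
  if text = "" ∨ text ∈ st.1 then st
  else (PySem.Set.add st.1 text, st.2 ++ [text])

def pvCleanStrList (values : List String) : List String :=
  (values.foldl pvCleanStep (PySem.Set.empty, [])).2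

def replace_predictors_py (predictors : List String) (replacements : List (String × List String)) : List String :=
  pvCleanStrList (predictors.foldl (fun acc predictor =>
    match pvLookup replacements predictor with
    | some vs => acc ++ vs
    | none => acc ++ [predictor]) [])

-- ===== PORT B =====
-- _dedup's while loop: emit the head (unless empty), delete its later copies, continue
def pvDedupLoop : List String → List String → List String
  | result, [] => result
  | result, h :: t =>
    pvDedupLoop (if h = "" then result else result ++ [h]) (t.filter (fun x => x ≠ h))
termination_by _ pending => pending.length
decreasing_by
  simp only [List.length_unattach]
  exact Nat.lt_succ_of_le (le_trans (List.length_filter_le _ _) (by simp))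

def pvDedup (texts : List String) : List String := pvDedupLoop [] texts

def replace_predictors_py_alt (predictors : List String) (replacements : List (String × List String)) : List String :=
  pvDedup (predictors.flatMap (fun predictor =>
    (match pvLookup replacements predictor with
     | some vs => vs
     | none => [predictor]).map PySem.Str.strip))

-- ===== PRECONDITION & SPEC =====
def Spec_replace_predictors_py (predictors : List String) (replacements : List (String × List String)) (out : List String) : Prop := out = replace_predictors_py_alt predictors replacements
instance (predictors : List String) (replacements : List (String × List String)) (out : List String) : Decidable (Spec_replace_predictors_py predictors replacements out) := by unfold Spec_replace_predictors_py; infer_instance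

-- ===== CLAIM =====
def Claim_equal_replace_predictors_py : Prop := ∀ (predictors : List String) (replacements : List (String × List String)), Dom_replace_predictors_py predictors replacements → Spec_replace_predictors_py predictors replacements (replace_predictors_py predictors replacements)

-- ===== LEMMAS AND PROOFS =====
-- recursive form of B's dedup loop, used only in the proofs
def pvDedupRec : List String → List String
  | [] => []
  | h :: t =>
    let rest := pvDedupRec (t.filter (fun x => x ≠ h))
    if h = "" then rest else h :: rest
termination_by l => l.length
decreasing_by
  simp only [List.length_unattach]
  exact Nat.lt_succ_of_le (le_trans (List.length_filter_le _ _) (by simp))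

theorem pv_loop_eq_rec : ∀ (n : Nat) (pending : List String), pending.length ≤ n →
    ∀ (result : List String), pvDedupLoop result pending = result ++ pvDedupRec pending := by
  intro n
  induction n with
  | zero =>
    intro pending hl
    have : pending = [] := List.eq_nil_of_length_eq_zero (Nat.le_zero.mp hl)
    subst this; intro result; simp [pvDedupLoop.eq_def, pvDedupRec.eq_def]
  | succ n ih =>
    intro pending hl result
    cases pending with
    | nil => simp [pvDedupLoop.eq_def, pvDedupRec.eq_def]
    | cons h t =>
      rw [pvDedupLoop.eq_def, pvDedupRec.eq_def]
      simp only []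
      rw [ih (t.filter (fun x => x ≠ h))
        (le_trans (List.length_filter_le _ _) (Nat.le_of_succ_le_succ hl))]
      by_cases hh : h = ""
      · rw [if_pos hh, if_pos hh]
      · rw [if_neg hh, if_neg hh]; simp

-- A's seen-set pass, as a recursion parameterised by the current seen-set
def pvDedupFrom (s : PySem.Set String) : List String → List String
  | [] => []
  | h :: t =>
    if h = "" ∨ h ∈ s then pvDedupFrom s t
    else h :: pvDedupFrom (PySem.Set.add s h) t

-- A's fold equals pvDedupFrom on the stripped list
theorem pv_fold_eq_dedupFrom (xs : List String) :
    ∀ (s : PySem.Set String) (acc : List String),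
      (xs.foldl pvCleanStep (s, acc)).2 = acc ++ pvDedupFrom s (xs.map PySem.Str.strip) := by
  induction xs with
  | nil => intro s acc; simp [pvDedupFrom]
  | cons h t ih =>
    intro s acc
    simp only [List.foldl_cons, List.map_cons, pvDedupFrom, pvCleanStep]
    split
    · rw [ih]
    · rw [ih]; simp

-- pvDedup ignores deletion of empty strings
theorem pv_dedup_filter_ne_empty : ∀ (n : Nat) (l : List String), l.length ≤ n →
    pvDedupRec (l.filter (fun x => x ≠ "")) = pvDedupRec l := by
  intro n
  induction n with
  | zero =>
    intro l hl
    have : l = [] := List.eq_nil_of_length_eq_zero (Nat.le_zero.mp hl)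
    subst this; rfl
  | succ n ih =>
    intro l hl
    cases l with
    | nil => rfl
    | cons h t =>
      by_cases hh : h = ""
      · subst hh
        simp only [List.filter_cons, decide_eq_true_eq]
        rw [if_neg (by simp)]
        conv_rhs => rw [pvDedupRec.eq_def]
        simp
      · simp only [List.filter_cons, decide_eq_true_eq, if_pos hh]
        rw [pvDedupRec.eq_def, pvDedupRec.eq_def]
        simp only []
        rw [if_neg hh, if_neg hh]
        congr 1
        rw [List.filter_comm]
        exact ih (t.filter (fun x => x ≠ h))
          (le_trans (List.length_filter_le _ _) (Nat.le_of_succ_le_succ hl))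

theorem pv_dedupFrom_eq_dedup : ∀ (n : Nat) (l : List String), l.length ≤ n →
    ∀ (s : PySem.Set String),
      pvDedupFrom s l = pvDedupRec (l.filter (fun x => decide (x ∉ s))) := by
  intro n
  induction n with
  | zero =>
    intro l hl
    have : l = [] := List.eq_nil_of_length_eq_zero (Nat.le_zero.mp hl)
    subst this; intro s; simp [pvDedupFrom, pvDedupRec.eq_def]
  | succ n ih =>
    intro l hl s
    cases l with
    | nil => simp [pvDedupFrom, pvDedupRec.eq_def]
    | cons h t =>
      have ht : t.length ≤ n := Nat.le_of_succ_le_succ hl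
      by_cases hc : h ∈ s
      · rw [pvDedupFrom, if_pos (Or.inr hc)]
        simp only [List.filter_cons, decide_eq_true_eq]
        rw [if_neg (by simp [hc])]
        exact ih t ht s
      · by_cases hh : h = ""
        · rw [pvDedupFrom, if_pos (Or.inl hh)]
          simp only [List.filter_cons]
          rw [if_pos (by simp [hc]), pvDedupRec.eq_def]
          simp only []
          rw [if_pos hh]
          subst hh
          rw [pv_dedup_filter_ne_empty (t.filter (fun x => decide (x ∉ s))).length _ le_rfl]
          exact ih t ht s
        · rw [pvDedupFrom, if_neg (by simp [hh, hc])]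
          simp only [List.filter_cons]
          rw [if_pos (by simp [hc]), pvDedupRec.eq_def]
          simp only []
          rw [if_neg hh]
          congr 1
          rw [ih t ht (PySem.Set.add s h)]
          congr 1
          rw [List.filter_filter]
          apply List.filter_congr
          intro x _
          simp [PySem.Set.mem_add, not_or, Bool.and_comm]

-- A's expansion fold equals flatMap
theorem pv_expand_eq_flatMap (replacements : List (String × List String)) :
    ∀ (predictors : List String) (l : List String),
      predictors.foldl (fun acc predictor =>
        match pvLookup replacements predictor with
        | some vs => acc ++ vs
        | none => acc ++ [predictor]) l
      = l ++ predictors.flatMap (fun predictor =>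
          match pvLookup replacements predictor with
          | some vs => vs
          | none => [predictor]) := by
  intro predictors
  induction predictors with
  | nil => intro l; simp
  | cons p t ih =>
    intro l
    simp only [List.foldl_cons, List.flatMap_cons]
    cases h : pvLookup replacements p with
    | none => rw [ih]; simp
    | some vs => rw [ih]; simp

-- ===== VERDICT =====
theorem replace_predictors_py_spec : Claim_equal_replace_predictors_py := by
  intro predictors replacements _
  show replace_predictors_py predictors replacements = replace_predictors_py_alt predictors replacements
  unfold replace_predictors_py replace_predictors_py_alt pvCleanStrList
  unfold pvDedup
  rw [pv_expand_eq_flatMap, List.nil_append, pv_fold_eq_dedupFrom, List.nil_append,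
    pv_loop_eq_rec _ _ le_rfl, List.nil_append, pv_dedupFrom_eq_dedup _ _ le_rfl]
  have : ∀ (l : List String), l.filter (fun x => decide (x ∉ (PySem.Set.empty : PySem.Set String))) = l := by
    intro l; simp [PySem.Set.empty]
  rw [this, List.map_flatMap]
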